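-- pv_equiv track=rewrite | github.com/EnchengLiu/Coursera-Happy-Exercise-with-Jiayi | OA_Code/1114.py | maxTrailing
-- ===== SOURCE A (Python) =====
-- def maxTrailing(arr):
--     max = 0
--     min = arr[0]
--     if not arr or len(arr) <2:
--         return -1
--
--
--
--     for i in range(1,len(arr)):
--         if arr[i] < min:
--             min = arr[i]
--         if arr[i] - min > max:
--             max = arr[i] - min
--     return max
-- ===== SOURCE B (Python) =====
-- def maxTrailing(arr):
--     if len(arr) < 2:
--         return -1
--     suf = arr[:]
--     for i in range(len(arr) - 2, -1, -1):
--         if suf[i + 1] > suf[i]: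
--             suf[i] = suf[i + 1]
--     res = 0
--     for a, s in zip(arr, suf[1:]):
--         if s - a > res:
--             res = s - a
--     return res
-- ===== Notes on version B (the rewrite author's own statement) =====
-- stated objective: alternative
-- what changed: Replaces the single running-minimum scan with a suffix-maximum table built right-to-left plus a second left-to-right pass taking max(suf[i+1]-arr[i]); same O(n) cost, different decomposition.
import Mathlib
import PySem

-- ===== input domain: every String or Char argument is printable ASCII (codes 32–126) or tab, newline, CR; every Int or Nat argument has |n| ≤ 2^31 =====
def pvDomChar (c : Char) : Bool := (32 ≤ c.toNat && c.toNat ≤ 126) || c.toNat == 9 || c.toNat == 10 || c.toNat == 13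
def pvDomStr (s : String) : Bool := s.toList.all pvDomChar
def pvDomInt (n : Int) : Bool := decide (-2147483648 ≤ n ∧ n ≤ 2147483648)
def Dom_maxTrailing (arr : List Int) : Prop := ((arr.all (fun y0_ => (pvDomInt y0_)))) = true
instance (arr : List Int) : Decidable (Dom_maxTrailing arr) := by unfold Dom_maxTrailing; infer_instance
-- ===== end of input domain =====

-- B replaces A's running-minimum scan with a suffix-maximum table plus a second pass (same O(n) cost);
-- return-value equivalence is proved on all nonempty lists (on [] A raises IndexError, B returns -1).

-- ===== PORT A =====
-- loop body of A: update min, then max, in that order (arr[i] is the folded element)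
def stepA (s : Int × Int) (x : Int) : Int × Int :=
  let mn := if x < s.2 then x else s.2
  ((if x - mn > s.1 then x - mn else s.1), mn)

def maxTrailing (arr : List Int) : Int :=
  match arr with
  | [] => 0  -- Python: `min = arr[0]` raises IndexError here; excluded by Pre_maxTrailing
  | a0 :: rest =>
    if arr.length < 2 then -1
    else
      -- for i in range(1, len(arr)): reads arr[i], i.e. folds over rest with state (max, min)
      (rest.foldl stepA (0, a0)).1

-- ===== PORT B =====
-- first loop of B: suf built right-to-left, suf[i] = max(arr[i], suf[i+1])
def sufMax : List Int → List Int
  | [] => []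
  | [x] => [x]
  | x :: y :: t =>
    let s := sufMax (y :: t)
    (if s.headD 0 > x then s.headD 0 else x) :: s

-- second loop body of B
def stepB (r : Int) (p : Int × Int) : Int :=
  if p.2 - p.1 > r then p.2 - p.1 else r

def maxTrailing_alt (arr : List Int) : Int :=
  if arr.length < 2 then -1
  else
    -- for a, s in zip(arr, suf[1:]): res = max(res, s - a)
    ((arr.zip ((sufMax arr).drop 1)).foldl stepB 0)

-- ===== PRECONDITION & SPEC =====
-- Pre_ excludes only the empty list, on which A raises IndexError (arr[0] before the guard).
def Pre_maxTrailing (arr : List Int) : Prop := arr ≠ []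
instance (arr : List Int) : Decidable (Pre_maxTrailing arr) := by unfold Pre_maxTrailing; infer_instance

def pvWitness_maxTrailing : List Int := ([1, 7, 3])

def Spec_maxTrailing (arr : List Int) (out : Int) : Prop := out = maxTrailing_alt arr
instance (arr : List Int) (out : Int) : Decidable (Spec_maxTrailing arr out) := by unfold Spec_maxTrailing; infer_instance

-- ===== CLAIM (what is proved, stated in full; the proofs are below) =====
def Claim_equal_maxTrailing : Prop := ∀ (arr : List Int), Dom_maxTrailing arr → Pre_maxTrailing arr → Spec_maxTrailing arr (maxTrailing arr)

-- ===== LEMMAS AND PROOFS =====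

-- reference value: max(0, best difference x - (running min starting at mn)) over t
def best (mn : Int) : List Int → Int
  | [] => 0
  | x :: t => max (max 0 (x - mn)) (best (min mn x) t)

theorem best_nonneg (mn : Int) (t : List Int) : 0 ≤ best mn t := by
  induction t generalizing mn with
  | nil => simp [best]
  | cons x t ih =>
    simp only [best]
    exact le_max_of_le_left (le_max_left 0 _)

theorem stepA_eq (s : Int × Int) (x : Int) :
    stepA s x = (max s.1 (max 0 (x - s.2)), min s.2 x) := by
  simp only [stepA, Prod.mk.injEq]
  constructor <;> (simp only [Int.max_def, Int.min_def]; split_ifs <;> omega)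

theorem foldA_eq (t : List Int) : ∀ (mx mn : Int), 0 ≤ mx →
    (t.foldl stepA (mx, mn)).1 = max mx (best mn t) := by
  induction t with
  | nil => intro mx mn h; simp [best]; omega
  | cons x t ih =>
    intro mx mn h
    rw [List.foldl_cons, stepA_eq]
    rw [ih _ _ (by simp only [Int.max_def]; split_ifs <;> omega)]
    simp only [best, Int.max_def, Int.min_def]
    split_ifs <;> omega

theorem foldl_max_assoc (t : List Int) : ∀ (a b : Int),
    t.foldl max (max a b) = max a (t.foldl max b) := by
  induction t with
  | nil => intro a b; rfl
  | cons y t ih =>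
    intro a b
    simp only [List.foldl_cons]
    rw [max_assoc, ih]

theorem sufMax_cons (t : List Int) : ∀ (x : Int),
    sufMax (x :: t) = (t.foldl max x) :: sufMax t := by
  induction t with
  | nil => intro x; rfl
  | cons y t ih =>
    intro x
    simp only [sufMax, ih y, List.headD_cons, List.foldl_cons]
    rw [foldl_max_assoc]
    congr 1
    simp only [Int.max_def]; split_ifs <;> omega

-- decomposition of best at the head: the external term uses the list's max
theorem best_decomp (t : List Int) : ∀ (x mn : Int),
    best mn (x :: t) = max (max 0 (t.foldl max x - mn)) (best x t) := by
  induction t with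
  | nil =>
    intro x mn
    simp only [best, List.foldl_nil]
  | cons y t ih =>
    intro x mn
    have h1 : best (min mn x) (y :: t) = max (max 0 (t.foldl max y - min mn x)) (best y t) := ih y (min mn x)
    have h2 : best x (y :: t) = max (max 0 (t.foldl max y - x)) (best y t) := ih y x
    have h3 : (y :: t).foldl max x = max x (t.foldl max y) := by
      simp only [List.foldl_cons]; exact foldl_max_assoc t x y
    show max (max 0 (x - mn)) (best (min mn x) (y :: t)) = _
    rw [h1, h2, h3]
    simp only [Int.max_def, Int.min_def]
    split_ifs <;> omega

theorem foldB_eq (t : List Int) : ∀ (mn r : Int), 0 ≤ r →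
    ((mn :: t).zip ((sufMax (mn :: t)).drop 1)).foldl stepB r = max r (best mn t) := by
  induction t with
  | nil => intro mn r h; simp [sufMax, best]; omega
  | cons x t ih =>
    intro mn r h
    rw [sufMax_cons (x :: t) mn]
    simp only [List.drop_one, List.tail_cons]
    rw [sufMax_cons t x, List.zip_cons_cons, List.foldl_cons]
    have hs : stepB r (mn, t.foldl max x) = max r (t.foldl max x - mn) := by
      simp only [stepB, Int.max_def]; split_ifs <;> omega
    have hr : (0 : Int) ≤ max r (t.foldl max x - mn) := le_max_of_le_left h
    have hih := ih x (max r (t.foldl max x - mn)) hr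
    rw [sufMax_cons t x] at hih
    simp only [List.drop_one, List.tail_cons] at hih
    rw [hs, hih, best_decomp t x mn]
    have hb := best_nonneg x t
    simp only [Int.max_def]; split_ifs <;> omega

-- ===== VERDICT (by name: the statement is the Claim_ definition above) =====
theorem maxTrailing_spec : Claim_equal_maxTrailing := by
  intro arr _ hpre
  unfold Spec_maxTrailing
  match arr, hpre with
  | a0 :: rest, _ =>
    match rest with
    | [] => rfl
    | x :: t =>
      simp only [maxTrailing, maxTrailing_alt, List.length_cons]
      have hlen : ¬ (t.length + 1 + 1 < 2) := by omega
      rw [if_neg hlen, if_neg hlen]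
      rw [foldA_eq _ 0 a0 le_rfl, foldB_eq (x :: t) a0 0 le_rfl]
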